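-- pv_equiv track=rewrite | github.com/yarens8/VisionQA | backend/core/mobile/engine.py | _root_cause
-- ===== SOURCE A (Python) =====
-- from typing import Any, Dict, List, Optional
--
-- def _root_cause(findings: List[Dict[str, Any]], screen_type: str) -> str:
--     categories = {finding["category"] for finding in findings}
--     if "overflow" in categories:
--         return "En baskin kok neden responsive constraint ve viewport-oncelikli yerlesim kararlarinin zayif olmasi."
--     if "touch-target" in categories:
--         return "En baskin kok neden desktop veya genel tasarim tokenlerinin mobile tap hedeflerine uygun olmamasi."
--     if "keyboard-overlap" in categories:
--         return "En baskin kok neden mobil form akisi tasarlanirken yazilim klavyesi ve viewport daralmasinin yeterince hesaba katilmamasi."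
--     if "auth-friction" in categories:
--         return "En baskin kok neden mobil auth akisinda birincil/ikincil aksiyon ayriminin zayif kurulmasi."
--     return "Belirgin tekil bir kok neden yerine mobil density, touch ve readability katmanlari birlikte gozden gecirilmeli."
-- ===== SOURCE B (Python) =====
-- _RANK = {"overflow": 0, "touch-target": 1, "keyboard-overlap": 2, "auth-friction": 3}
--
-- _MSGS = [
--     "En baskin kok neden responsive constraint ve viewport-oncelikli yerlesim kararlarinin zayif olmasi.",
--     "En baskin kok neden desktop veya genel tasarim tokenlerinin mobile tap hedeflerine uygun olmamasi.",
--     "En baskin kok neden mobil form akisi tasarlanirken yazilim klavyesi ve viewport daralmasinin yeterince hesaba katilmamasi.",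
--     "En baskin kok neden mobil auth akisinda birincil/ikincil aksiyon ayriminin zayif kurulmasi.",
--     "Belirgin tekil bir kok neden yerine mobil density, touch ve readability katmanlari birlikte gozden gecirilmeli.",
-- ]
--
--
-- def _root_cause(findings, screen_type):
--     best = 4  # 4 = no priority category seen
--     for finding in findings:
--         best = min(best, _RANK.get(finding["category"], 4))
--     return _MSGS[best]
-- ===== Notes on version B (the rewrite author's own statement) =====
-- stated objective: alternative
-- what changed: Replaces the set comprehension plus a fixed chain of four membership tests with one loop that keeps the minimum priority rank seen and a rank-to-message table lookup.
import Mathlib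
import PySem

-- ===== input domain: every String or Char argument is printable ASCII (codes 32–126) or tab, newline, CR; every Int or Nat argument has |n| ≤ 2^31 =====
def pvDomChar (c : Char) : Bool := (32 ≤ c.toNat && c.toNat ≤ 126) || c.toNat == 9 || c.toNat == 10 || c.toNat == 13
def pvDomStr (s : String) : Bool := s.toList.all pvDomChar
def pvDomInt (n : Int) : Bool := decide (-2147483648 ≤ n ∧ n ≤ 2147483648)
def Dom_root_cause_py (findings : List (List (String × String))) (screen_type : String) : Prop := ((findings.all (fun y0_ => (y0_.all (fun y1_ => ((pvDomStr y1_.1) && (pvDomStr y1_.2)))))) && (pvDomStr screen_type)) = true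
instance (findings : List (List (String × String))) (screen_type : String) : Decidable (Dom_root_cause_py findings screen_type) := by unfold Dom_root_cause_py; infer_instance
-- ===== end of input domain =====

-- B is an alternative single-pass formulation: a running minimum over a priority-rank table
-- instead of a set comprehension followed by a fixed chain of membership tests.

-- finding["category"]; exact on Pre_ (the key is present); none/"" only outside Pre_
def pvCategory (f : List (String × String)) : String :=
  ((PySem.Dict.mk f).get? "category").getD ""

-- ===== PORT A =====
def root_cause_py (findings : List (List (String × String))) (_screen_type : String) : String :=
  let categories : PySem.Set String := PySem.Set.ofList (findings.map pvCategory)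
  if PySem.Set.contains categories "overflow" then
    "En baskin kok neden responsive constraint ve viewport-oncelikli yerlesim kararlarinin zayif olmasi."
  else if PySem.Set.contains categories "touch-target" then
    "En baskin kok neden desktop veya genel tasarim tokenlerinin mobile tap hedeflerine uygun olmamasi."
  else if PySem.Set.contains categories "keyboard-overlap" then
    "En baskin kok neden mobil form akisi tasarlanirken yazilim klavyesi ve viewport daralmasinin yeterince hesaba katilmamasi."
  else if PySem.Set.contains categories "auth-friction" then
    "En baskin kok neden mobil auth akisinda birincil/ikincil aksiyon ayriminin zayif kurulmasi."
  else
    "Belirgin tekil bir kok neden yerine mobil density, touch ve readability katmanlari birlikte gozden gecirilmeli."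

-- ===== PORT B =====
def pvRank : PySem.Dict String Int :=
  PySem.Dict.mk [("overflow", 0), ("touch-target", 1), ("keyboard-overlap", 2), ("auth-friction", 3)]

def pvMsgs : List String :=
  [ "En baskin kok neden responsive constraint ve viewport-oncelikli yerlesim kararlarinin zayif olmasi.",
    "En baskin kok neden desktop veya genel tasarim tokenlerinin mobile tap hedeflerine uygun olmamasi.",
    "En baskin kok neden mobil form akisi tasarlanirken yazilim klavyesi ve viewport daralmasinin yeterince hesaba katilmamasi.",
    "En baskin kok neden mobil auth akisinda birincil/ikincil aksiyon ayriminin zayif kurulmasi.",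
    "Belirgin tekil bir kok neden yerine mobil density, touch ve readability katmanlari birlikte gozden gecirilmeli." ]

def root_cause_py_alt (findings : List (List (String × String))) (_screen_type : String) : String :=
  let best : Int := findings.foldl (fun b f => min b (PySem.Dict.getD pvRank (pvCategory f) 4)) 4
  -- _MSGS[best]: exact since 0 ≤ best ≤ 4 < len(_MSGS)
  (PySem.List.pyGet? pvMsgs best).getD ""

-- ===== PRECONDITION & SPEC =====
-- Pre_ excludes exactly the findings with no "category" key, on which both Pythons raise KeyError.
def Pre_root_cause_py (findings : List (List (String × String))) (_screen_type : String) : Prop :=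
  ∀ f ∈ findings, "category" ∈ f.map Prod.fst
instance (findings : List (List (String × String))) (screen_type : String) : Decidable (Pre_root_cause_py findings screen_type) := by unfold Pre_root_cause_py; infer_instance

def pvWitness_root_cause_py : (List (List (String × String))) × String :=
  ([[("category", "overflow")], [("category", "misc")]], "home")

def Spec_root_cause_py (findings : List (List (String × String))) (screen_type : String) (out : String) : Prop := out = root_cause_py_alt findings screen_type
instance (findings : List (List (String × String))) (screen_type : String) (out : String) : Decidable (Spec_root_cause_py findings screen_type out) := by unfold Spec_root_cause_py; infer_instance

-- ===== CLAIM (what is proved, stated in full; the proofs are below) =====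
def Claim_equal_root_cause_py : Prop := ∀ (findings : List (List (String × String))) (screen_type : String), Dom_root_cause_py findings screen_type → Pre_root_cause_py findings screen_type → Spec_root_cause_py findings screen_type (root_cause_py findings screen_type)

-- ===== LEMMAS AND PROOFS =====

-- the rank dict as an if-chain
theorem pvRank_getD (c : String) :
    PySem.Dict.getD pvRank c 4 =
      if c = "overflow" then 0 else if c = "touch-target" then 1
      else if c = "keyboard-overlap" then 2 else if c = "auth-friction" then 3 else 4 := by
  by_cases h0 : c = "overflow"
  · subst h0; decide
  by_cases h1 : c = "touch-target"
  · subst h1; decide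
  by_cases h2 : c = "keyboard-overlap"
  · subst h2; decide
  by_cases h3 : c = "auth-friction"
  · subst h3; decide
  have h0' : ¬ ("overflow" = c) := fun h => h0 h.symm
  have h1' : ¬ ("touch-target" = c) := fun h => h1 h.symm
  have h2' : ¬ ("keyboard-overlap" = c) := fun h => h2 h.symm
  have h3' : ¬ ("auth-friction" = c) := fun h => h3 h.symm
  simp [pvRank, PySem.Dict.getD, PySem.Dict.get?,
    beq_iff_eq, h0, h1, h2, h3, h0', h1', h2', h3']

-- the result of A's membership chain, as a rank
def pvChainRank (cats : List String) : Int :=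
  if "overflow" ∈ cats then 0 else if "touch-target" ∈ cats then 1
  else if "keyboard-overlap" ∈ cats then 2 else if "auth-friction" ∈ cats then 3 else 4

theorem pvChainRank_cons (c : String) (L : List String) :
    pvChainRank (c :: L) = min (PySem.Dict.getD pvRank c 4) (pvChainRank L) := by
  rw [pvRank_getD]
  simp only [pvChainRank, List.mem_cons]
  by_cases h0 : c = "overflow" <;> by_cases h1 : c = "touch-target" <;>
    by_cases h2 : c = "keyboard-overlap" <;> by_cases h3 : c = "auth-friction" <;>
    simp [h0, h1, h2, h3] <;> split_ifs <;> simp_all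

theorem pvFold_eq (fs : List (List (String × String))) (b : Int) (hb : b ≤ 4) :
    fs.foldl (fun b f => min b (PySem.Dict.getD pvRank (pvCategory f) 4)) b
      = min b (pvChainRank (fs.map pvCategory)) := by
  induction fs generalizing b with
  | nil => simp [pvChainRank]; omega
  | cons f fs ih =>
      rw [List.foldl_cons, ih _ (le_trans (min_le_left _ _) hb), List.map_cons,
        pvChainRank_cons, min_assoc]

theorem pvChainRank_le (cats : List String) : pvChainRank cats ≤ 4 := by
  unfold pvChainRank; split_ifs <;> omega

-- ===== VERDICT (by name: the statement is the Claim_ definition above) =====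
theorem root_cause_py_spec : Claim_equal_root_cause_py := by
  intro findings screen_type _ _
  unfold Spec_root_cause_py root_cause_py root_cause_py_alt
  rw [pvFold_eq _ _ le_rfl, min_eq_right (pvChainRank_le _)]
  simp only [PySem.Set.contains, PySem.Set.mem_ofList, List.contains_eq_mem, pvChainRank]
  split_ifs <;> simp_all <;> rfl
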